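-- pv_equiv track=rewrite | github.com/BJT207/CISC106 | final_project/main.py | verify_file_name
-- ===== SOURCE A (Python) =====
-- def verify_file_name(fileName:str) -> bool:
--     '''
--     Takes in a file name and returns a bool stating if it is or isnt
--
--     Args:
--         file_name (str): the file name to be validated
--
--     Returns:
--         bool: if the file name is valid or not
--     '''
--     validCharList = ['A', 'B', 'C', 'D', 'E', 'F', 'G', 'H', 'I', 'J', 'K', 'L', 'M', 'N', 'O', 'P', 'Q', 'R', 'S', 'T', 'U', 'V', 'W', 'X', 'Y', 'Z',
--                      'a', 'b', 'c', 'd', 'e', 'f', 'g', 'h', 'i', 'j', 'k', 'l', 'm', 'n', 'o', 'p', 'q', 'r', 's', 't', 'u', 'v', 'w', 'x', 'y', 'z',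
--                      '1','2','3','4','5','6','7','8','9','-', '_', '.']
--
--     nameIsValid = True
--     fileNameLength = len(fileName)
--     if fileNameLength > 0 and fileNameLength <= 50:
--         if (fileName[0] == '.') or (fileName[-1] == '.'):
--             nameIsValid = False
--         else:
--             for letter in fileName:
--                 if not (letter in validCharList):
--                     nameIsValid = False
--     else:
--         nameIsValid = False
--     return nameIsValid
-- ===== SOURCE B (Python) =====
-- import re
--
-- # 1..50 chars from [A-Za-z1-9._-] (note: no '0'), not starting or ending with '.'
-- _FILENAME_RE = re.compile(r'(?!\.)[A-Za-z1-9._-]{1,50}(?<!\.)')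
--
--
-- def verify_file_name(fileName: str) -> bool:
--     '''
--     Takes in a file name and returns a bool stating if it is or isnt valid.
--     '''
--     return _FILENAME_RE.fullmatch(fileName) is not None
-- ===== Notes on version B (the rewrite author's own statement) =====
-- stated objective: idiomatic
-- what changed: Replaces the explicit length check, index checks for a leading/trailing dot and the per-character flag loop over a 62-element list with a single precompiled regex fullmatch whose character class reproduces exactly A's valid-character list (digits 1-9 only).
import Mathlib
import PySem

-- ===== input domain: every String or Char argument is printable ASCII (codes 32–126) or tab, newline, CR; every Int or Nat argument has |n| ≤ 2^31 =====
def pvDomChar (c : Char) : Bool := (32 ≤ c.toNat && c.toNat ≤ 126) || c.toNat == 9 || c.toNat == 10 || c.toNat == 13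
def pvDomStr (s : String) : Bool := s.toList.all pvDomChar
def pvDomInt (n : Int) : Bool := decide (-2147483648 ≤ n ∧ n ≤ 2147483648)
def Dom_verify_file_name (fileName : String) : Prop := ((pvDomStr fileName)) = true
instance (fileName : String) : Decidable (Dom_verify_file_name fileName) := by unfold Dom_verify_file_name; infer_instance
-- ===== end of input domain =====

-- B replaces A's length check, dot checks and per-character flag loop by one regex fullmatch; idiomatic, same behaviour.

-- ===== PORT A =====
def pvValidCharList : List Char :=
  ['A', 'B', 'C', 'D', 'E', 'F', 'G', 'H', 'I', 'J', 'K', 'L', 'M', 'N', 'O', 'P', 'Q', 'R', 'S', 'T', 'U', 'V', 'W', 'X', 'Y', 'Z',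
   'a', 'b', 'c', 'd', 'e', 'f', 'g', 'h', 'i', 'j', 'k', 'l', 'm', 'n', 'o', 'p', 'q', 'r', 's', 't', 'u', 'v', 'w', 'x', 'y', 'z',
   '1', '2', '3', '4', '5', '6', '7', '8', '9', '-', '_', '.']

def verify_file_name (fileName : String) : Bool :=
  let fileNameLength : Int := PySem.Str.len fileName
  if fileNameLength > 0 ∧ fileNameLength ≤ 50 then
    if PySem.Str.pyGet? fileName 0 = some '.' ∨ PySem.Str.pyGet? fileName (-1) = some '.' then
      false
    else
      fileName.toList.foldl
        (fun nameIsValid letter =>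
          if ¬ (pvValidCharList.contains letter) then false else nameIsValid) true
  else
    false

-- ===== PORT B =====
-- B is `bool(re.fullmatch(r'(?!\.)[A-Za-z1-9._-]{1,50}(?<!\.)', fileName))`; the regex
-- engine call is ported by its meaning on this pattern: the character class is the three
-- code-point ranges plus '.', '_', '-'; the lookarounds forbid '.' as first/last char.
def pvClassChar (c : Char) : Bool :=
  (65 ≤ c.toNat && c.toNat ≤ 90) || (97 ≤ c.toNat && c.toNat ≤ 122) ||
  (49 ≤ c.toNat && c.toNat ≤ 57) || c == '.' || c == '_' || c == '-'

def verify_file_name_alt (fileName : String) : Bool :=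
  let cs := fileName.toList
  decide (1 ≤ cs.length) && decide (cs.length ≤ 50) && cs.all pvClassChar &&
    !(cs.head? == some '.') && !(cs.getLast? == some '.')

-- ===== PRECONDITION & SPEC =====
def Spec_verify_file_name (fileName : String) (out : Bool) : Prop := out = verify_file_name_alt fileName
instance (fileName : String) (out : Bool) : Decidable (Spec_verify_file_name fileName out) := by unfold Spec_verify_file_name; infer_instance

-- ===== CLAIM (what is proved, stated in full; the proofs are below) =====
def Claim_equal_verify_file_name : Prop := ∀ (fileName : String), Dom_verify_file_name fileName → Spec_verify_file_name fileName (verify_file_name fileName)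

-- ===== LEMMAS AND PROOFS =====

theorem pv_char_toNat_eq (c d : Char) : (c = d) ↔ (c.toNat = d.toNat) :=
  ⟨fun h => h ▸ rfl, fun h => Char.ext (UInt32.toNat_inj.mp h)⟩

theorem pv_contains_eq_class (c : Char) : pvValidCharList.contains c = pvClassChar c := by
  rw [Bool.eq_iff_iff]
  simp only [pvValidCharList, pvClassChar, List.contains_eq_mem, List.mem_cons,
    List.not_mem_nil, or_false, Bool.or_eq_true, Bool.and_eq_true, beq_iff_eq,
    decide_eq_true_eq, pv_char_toNat_eq,
    show ('A'.toNat)=65 from rfl,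
    show ('B'.toNat)=66 from rfl,
    show ('C'.toNat)=67 from rfl,
    show ('D'.toNat)=68 from rfl,
    show ('E'.toNat)=69 from rfl,
    show ('F'.toNat)=70 from rfl,
    show ('G'.toNat)=71 from rfl,
    show ('H'.toNat)=72 from rfl,
    show ('I'.toNat)=73 from rfl,
    show ('J'.toNat)=74 from rfl,
    show ('K'.toNat)=75 from rfl,
    show ('L'.toNat)=76 from rfl,
    show ('M'.toNat)=77 from rfl,
    show ('N'.toNat)=78 from rfl,
    show ('O'.toNat)=79 from rfl,
    show ('P'.toNat)=80 from rfl,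
    show ('Q'.toNat)=81 from rfl,
    show ('R'.toNat)=82 from rfl,
    show ('S'.toNat)=83 from rfl,
    show ('T'.toNat)=84 from rfl,
    show ('U'.toNat)=85 from rfl,
    show ('V'.toNat)=86 from rfl,
    show ('W'.toNat)=87 from rfl,
    show ('X'.toNat)=88 from rfl,
    show ('Y'.toNat)=89 from rfl,
    show ('Z'.toNat)=90 from rfl,
    show ('a'.toNat)=97 from rfl,
    show ('b'.toNat)=98 from rfl,
    show ('c'.toNat)=99 from rfl,
    show ('d'.toNat)=100 from rfl,
    show ('e'.toNat)=101 from rfl,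
    show ('f'.toNat)=102 from rfl,
    show ('g'.toNat)=103 from rfl,
    show ('h'.toNat)=104 from rfl,
    show ('i'.toNat)=105 from rfl,
    show ('j'.toNat)=106 from rfl,
    show ('k'.toNat)=107 from rfl,
    show ('l'.toNat)=108 from rfl,
    show ('m'.toNat)=109 from rfl,
    show ('n'.toNat)=110 from rfl,
    show ('o'.toNat)=111 from rfl,
    show ('p'.toNat)=112 from rfl,
    show ('q'.toNat)=113 from rfl,
    show ('r'.toNat)=114 from rfl,
    show ('s'.toNat)=115 from rfl,
    show ('t'.toNat)=116 from rfl,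
    show ('u'.toNat)=117 from rfl,
    show ('v'.toNat)=118 from rfl,
    show ('w'.toNat)=119 from rfl,
    show ('x'.toNat)=120 from rfl,
    show ('y'.toNat)=121 from rfl,
    show ('z'.toNat)=122 from rfl,
    show ('1'.toNat)=49 from rfl,
    show ('2'.toNat)=50 from rfl,
    show ('3'.toNat)=51 from rfl,
    show ('4'.toNat)=52 from rfl,
    show ('5'.toNat)=53 from rfl,
    show ('6'.toNat)=54 from rfl,
    show ('7'.toNat)=55 from rfl,
    show ('8'.toNat)=56 from rfl,
    show ('9'.toNat)=57 from rfl,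
    show ('-'.toNat)=45 from rfl,
    show ('_'.toNat)=95 from rfl,
    show ('.'.toNat)=46 from rfl]
  omega

theorem pv_foldl_flag (l : List Char) (b : Bool) :
    l.foldl (fun nameIsValid letter =>
      if ¬ (pvValidCharList.contains letter) then false else nameIsValid) b
    = (b && l.all pvClassChar) := by
  induction l generalizing b with
  | nil => simp
  | cons c t ih =>
      rw [List.foldl_cons, List.all_cons, ← pv_contains_eq_class c]
      cases h : pvValidCharList.contains c
      · rw [if_pos (by simp), ih]
        simp
      · rw [if_neg (by simp), ih]; simp

-- ===== VERDICT (by name: the statement is the Claim_ definition above) =====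
theorem verify_file_name_spec : Claim_equal_verify_file_name := by
  intro s _
  unfold Spec_verify_file_name verify_file_name verify_file_name_alt
  simp only [PySem.Str.len_eq, PySem.Str.pyGet?_eq, PySem.Chars.pyGet?_eq_listPyGet?,
    PySem.List.pyGet?_zero, PySem.List.pyGet?_neg_one, pv_foldl_flag, Bool.true_and]
  simp only [List.head?_eq_getElem?]
  have hL : s.toList.length = s.length := by simp
  rcases Nat.lt_or_ge s.toList.length 1 with h1 | h1
  · have h0 : s.toList.length = 0 := by omega
    rw [if_neg (by omega)]
    simp [show ¬ (1 ≤ s.length) from by omega]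
  · by_cases h2 : s.toList.length ≤ 50
    · rw [if_pos ⟨by omega, by omega⟩]
      by_cases hd : s.toList[0]? = some '.'
      · rw [if_pos (Or.inl hd)]
        simp [hd]
      · by_cases hl : s.toList.getLast? = some '.'
        · rw [if_pos (Or.inr hl)]
          simp [hl]
        · rw [if_neg (by tauto)]
          rw [show (s.toList[0]? == some '.') = false from beq_eq_false_iff_ne.mpr hd,
              show (s.toList.getLast? == some '.') = false from beq_eq_false_iff_ne.mpr hl]
          simp [show 1 ≤ s.length from by omega, show s.length ≤ 50 from by omega]
    · rw [if_neg (by omega)]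
      simp [show ¬ (s.length ≤ 50) from by omega]
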